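-- pv_equiv track=rewrite | github.com/Mattis-Klein/AI-SMS-Agent | mashbak/agent/assistant_core.py | _formulate_search_query
-- ===== SOURCE A (Python) =====
-- def _formulate_search_query(message: str) -> str:
--     """Extract key terms from user message to form a focused search query.
--
--     Removes common filler words and keeps substantive terms for searching.
--     """
--     stop_words = {
--         "what", "who", "where", "when", "how", "why", "is", "are", "do", "does",
--         "the", "a", "an", "and", "or", "but", "can", "will", "should", "could",
--         "have", "has", "had", "be", "been", "was", "were", "i", "you", "he", "she",
--         "it", "we", "they", "this", "that", "these", "those", "my", "your", "his", "her",
--     }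
--
--     # Remove punctuation and split into words
--     words = []
--     current_word = ""
--     for char in message.lower():
--         if char.isalnum():
--             current_word += char
--         else:
--             if current_word and current_word not in stop_words and len(current_word) > 1:
--                 words.append(current_word)
--             current_word = ""
--     if current_word and current_word not in stop_words and len(current_word) > 1:
--         words.append(current_word)
--
--     # Build query from kept words (up to 10 words for reasonable search)
--     query = " ".join(words[:10]).strip()
--
--     # If query is too short, just use original message reduced
--     if len(query) < 3:
--         query = message[:100].strip()
--
--     return query
-- ===== SOURCE B (Python) =====
-- def _formulate_search_query(message: str) -> str:
--     """Extract key terms from user message to form a focused search query.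
--
--     Two-pass version: tokenize by blanking out non-alphanumeric characters and
--     splitting, then filter stop words in a separate pass.
--     """
--     stop_words = {
--         "what", "who", "where", "when", "how", "why", "is", "are", "do", "does",
--         "the", "a", "an", "and", "or", "but", "can", "will", "should", "could",
--         "have", "has", "had", "be", "been", "was", "were", "i", "you", "he", "she",
--         "it", "we", "they", "this", "that", "these", "those", "my", "your", "his", "her",
--     }
--
--     # Pass 1: tokenize — every maximal alphanumeric run of the lowered message
--     tokens = "".join(c if c.isalnum() else " " for c in message.lower()).split()
--
--     # Pass 2: filter out stop words and one-letter tokens, keep at most 10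
--     kept = [t for t in tokens if t not in stop_words and len(t) > 1]
--     query = " ".join(kept[:10]).strip()
--
--     # If query is too short, just use original message reduced
--     if len(query) < 3:
--         query = message[:100].strip()
--
--     return query
-- ===== Notes on version B (the rewrite author's own statement) =====
-- stated objective: idiomatic
-- what changed: Replaces the character-by-character accumulator loop (with inline stop-word filtering and a duplicated end-of-loop flush) by a two-pass pipeline: blank non-alphanumeric characters and split() to tokenize, then a comprehension filters stop words and one-letter tokens.
import Mathlib
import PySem

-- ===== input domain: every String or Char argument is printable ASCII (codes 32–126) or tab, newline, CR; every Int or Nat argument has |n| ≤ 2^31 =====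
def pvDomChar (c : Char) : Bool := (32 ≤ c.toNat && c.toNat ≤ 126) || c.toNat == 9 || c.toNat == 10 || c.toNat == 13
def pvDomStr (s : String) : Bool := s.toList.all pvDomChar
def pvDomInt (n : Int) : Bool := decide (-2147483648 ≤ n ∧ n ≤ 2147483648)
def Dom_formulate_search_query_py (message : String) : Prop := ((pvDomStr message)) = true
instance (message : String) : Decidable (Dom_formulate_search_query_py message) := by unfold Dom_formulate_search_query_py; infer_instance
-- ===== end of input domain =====

-- B replaces A's char-accumulator loop with a blank-then-split tokenizer followed by a separate filtering pass (same cost, more idiomatic).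

-- shared constant: the stop-word set literal of the Python source (as lists of chars)
def fsqStop : PySem.Set (List Char) :=
  PySem.Set.ofList (["what", "who", "where", "when", "how", "why", "is", "are", "do", "does",
    "the", "a", "an", "and", "or", "but", "can", "will", "should", "could",
    "have", "has", "had", "be", "been", "was", "were", "i", "you", "he", "she",
    "it", "we", "they", "this", "that", "these", "those", "my", "your", "his",
    "her"].map String.toList)

-- ===== PORT A =====
-- 'if current_word and current_word not in stop_words and len(current_word) > 1'
def fsqKeepA (w : List Char) : Bool :=
  !w.isEmpty && !(PySem.Set.contains fsqStop w) && decide (1 < w.length)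

-- the 'for char in message.lower():' loop; state = (words, current_word)
def fsqLoopA : List Char → List Char → List (List Char) → List (List Char) × List Char
  | [], cur, words => (words, cur)
  | c :: rest, cur, words =>
      if PySem.Chars.isalnum c then fsqLoopA rest (cur ++ [c]) words
      else fsqLoopA rest [] (if fsqKeepA cur then words ++ [cur] else words)

def formulate_search_query_py (message : String) : String :=
  let st := fsqLoopA (PySem.Chars.lower message.toList) [] []
  let words := if fsqKeepA st.2 then st.1 ++ [st.2] else st.1
  let query := PySem.Chars.strip (PySem.Chars.join [' '] (PySem.List.slice words none (some 10)))
  if PySem.Chars.len query < 3 then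
    String.ofList (PySem.Chars.strip (PySem.Chars.slice message.toList none (some 100)))
  else String.ofList query

-- ===== PORT B =====
-- 'c if c.isalnum() else " "'
def fsqBlank (c : Char) : Char := if PySem.Chars.isalnum c then c else ' '

-- 'if t not in stop_words and len(t) > 1'
def fsqKeepB (t : List Char) : Bool :=
  !(PySem.Set.contains fsqStop t) && decide (1 < t.length)

def formulate_search_query_py_alt (message : String) : String :=
  let tokens := PySem.Chars.split₀ ((PySem.Chars.lower message.toList).map fsqBlank)
  let kept := tokens.filter fsqKeepB
  let query := PySem.Chars.strip (PySem.Chars.join [' '] (PySem.List.slice kept none (some 10)))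
  if PySem.Chars.len query < 3 then
    String.ofList (PySem.Chars.strip (PySem.Chars.slice message.toList none (some 100)))
  else String.ofList query

-- ===== PRECONDITION & SPEC =====
def Spec_formulate_search_query_py (message : String) (out : String) : Prop := out = formulate_search_query_py_alt message
instance (message : String) (out : String) : Decidable (Spec_formulate_search_query_py message out) := by unfold Spec_formulate_search_query_py; infer_instance

-- ===== CLAIM (what is proved, stated in full; the proofs are below) =====
def Claim_equal_formulate_search_query_py : Prop := ∀ (message : String), Dom_formulate_search_query_py message → Spec_formulate_search_query_py message (formulate_search_query_py message)

-- ===== LEMMAS AND PROOFS =====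

lemma fsq_isalnum_not_isspace (c : Char) (h : PySem.Chars.isalnum c = true) :
    PySem.Chars.isspace c = false := by
  simp only [PySem.Chars.isalnum, PySem.Chars.isalpha, PySem.Chars.isdigit,
    PySem.Chars.isupper, PySem.Chars.islower, Bool.or_eq_true, Bool.and_eq_true,
    decide_eq_true_eq, Char.le_def, UInt32.le_iff_toNat_le] at h
  simp only [PySem.Chars.isspace, Bool.or_eq_false_iff, Bool.and_eq_false_iff,
    decide_eq_false_iff_not, Char.toNat]
  have h0 : ('0' : Char).val.toNat = 48 := rfl
  have h9 : ('9' : Char).val.toNat = 57 := rfl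
  have hA : ('A' : Char).val.toNat = 65 := rfl
  have hZ : ('Z' : Char).val.toNat = 90 := rfl
  have ha : ('a' : Char).val.toNat = 97 := rfl
  have hz : ('z' : Char).val.toNat = 122 := rfl
  omega

lemma fsq_go_acc (s cur acc : List Char) (accs : List (List Char)) :
    PySem.Chars.split₀.go s cur (accs ++ [acc]) =
      acc :: PySem.Chars.split₀.go s cur accs := by
  induction s generalizing cur accs with
  | nil => by_cases h : cur.isEmpty <;> simp [PySem.Chars.split₀.go, h]
  | cons c rest ih =>
      by_cases hs : PySem.Chars.isspace c
      · by_cases h : cur.isEmpty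
        · simp only [PySem.Chars.split₀.go, hs, h, if_true]
          exact ih _ _
        · simp only [PySem.Chars.split₀.go, hs, h, if_true, Bool.false_eq_true, if_false]
          exact ih [] (cur.reverse :: accs)
      · simp only [PySem.Chars.split₀.go, hs, Bool.false_eq_true, if_false]
        exact ih _ _

lemma fsq_go_single (s cur : List Char) (acc : List Char) :
    PySem.Chars.split₀.go s cur [acc] = acc :: PySem.Chars.split₀.go s cur [] :=
  fsq_go_acc s cur acc []

lemma fsq_keepA_eq (w : List Char) (h : w ≠ []) : fsqKeepA w = fsqKeepB w := by
  cases w with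
  | nil => exact absurd rfl h
  | cons a l => simp [fsqKeepA, fsqKeepB]

lemma fsq_loop_eq (cs cur : List Char) (words : List (List Char)) :
    (if fsqKeepA (fsqLoopA cs cur words).2
      then (fsqLoopA cs cur words).1 ++ [(fsqLoopA cs cur words).2]
      else (fsqLoopA cs cur words).1)
    = words ++ (PySem.Chars.split₀.go (cs.map fsqBlank) cur.reverse []).filter fsqKeepB := by
  induction cs generalizing cur words with
  | nil =>
      rcases List.eq_nil_or_concat' cur with h | ⟨w, c, h⟩
      · subst h; simp [fsqLoopA, fsqKeepA, PySem.Chars.split₀.go]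
      · subst h
        have hne : w ++ [c] ≠ [] := by simp
        simp only [fsqLoopA, List.map_nil]
        rw [fsq_keepA_eq _ hne]
        by_cases hk : fsqKeepB (w ++ [c]) <;>
          simp [hk, PySem.Chars.split₀.go]
  | cons c rest ih =>
      by_cases ha : PySem.Chars.isalnum c
      · have hs := fsq_isalnum_not_isspace c ha
        simp only [fsqLoopA, ha, if_pos, List.map_cons, fsqBlank]
        rw [ih]
        simp [PySem.Chars.split₀.go, hs]
      · have hsp : PySem.Chars.isspace ' ' = true := by decide
        simp only [fsqLoopA, ha, List.map_cons, fsqBlank, if_false, Bool.false_eq_true]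
        rw [ih]
        rcases List.eq_nil_or_concat' cur with h | ⟨w, d, h⟩
        · subst h; simp [fsqKeepA, PySem.Chars.split₀.go, hsp]
        · subst h
          have hne : w ++ [d] ≠ [] := by simp
          have hie : ((w ++ [d]).reverse.isEmpty) = false := by
            simp
          simp only [PySem.Chars.split₀.go, hsp, if_true, hie, Bool.false_eq_true,
            if_false, List.reverse_reverse, fsq_go_single]
          rw [fsq_keepA_eq _ hne]
          by_cases hk : fsqKeepB (w ++ [d]) <;>
            simp [hk, List.append_assoc]

-- ===== VERDICT (by name: the statement is the Claim_ definition above) =====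
theorem formulate_search_query_py_spec : Claim_equal_formulate_search_query_py := by
  intro message _
  unfold Spec_formulate_search_query_py formulate_search_query_py formulate_search_query_py_alt
  simp only [fsq_loop_eq, PySem.Chars.split₀, List.reverse_nil, List.nil_append]
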